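-- pv_equiv track=rewrite | github.com/tianrun-chen/Reason3D-PyTorch | 2D_seg.py | filter_bboxes
-- ===== SOURCE A (Python) =====
-- def calculate_bbox_area(bbox):
--     x1, y1, x2, y2 = bbox
--     width = abs(x2 - x1)
--     height = abs(y2 - y1)
--     area = width * height
--     return area
--
-- def filter_bboxes(bboxes):
--     areas = [(calculate_bbox_area(bbox), bbox) for bbox in bboxes]
--     areas.sort(reverse=True, key=lambda x: x[0])
--
--     max_area = areas[0][0]
--     new_bboxes = []
--
--     for area, bbox in areas:
--         if (max_area - area) <= 10000:      # Area check less than 10000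
--             new_bboxes.append(bbox)
--
--     return new_bboxes
-- ===== SOURCE B (Python) =====
-- def calculate_bbox_area(bbox):
--     x1, y1, x2, y2 = bbox
--     width = abs(x2 - x1)
--     height = abs(y2 - y1)
--     area = width * height
--     return area
--
-- def filter_bboxes(bboxes):
--     scored = [(calculate_bbox_area(b), b) for b in bboxes]
--     max_area = scored[0][0]
--     for a, _ in scored:
--         if a > max_area:
--             max_area = a
--     kept = [(a, b) for (a, b) in scored if max_area - a <= 10000]
--     kept.sort(reverse=True, key=lambda t: t[0])
--     return [b for (_, b) in kept]
-- ===== Notes on version B (the rewrite author's own statement) =====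
-- stated objective: alternative
-- what changed: B replaces A's sort-everything-then-filter with a running-max scan over the unsorted list, an order-preserving filter, and a stable descending sort of only the kept subset.
import Mathlib
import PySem

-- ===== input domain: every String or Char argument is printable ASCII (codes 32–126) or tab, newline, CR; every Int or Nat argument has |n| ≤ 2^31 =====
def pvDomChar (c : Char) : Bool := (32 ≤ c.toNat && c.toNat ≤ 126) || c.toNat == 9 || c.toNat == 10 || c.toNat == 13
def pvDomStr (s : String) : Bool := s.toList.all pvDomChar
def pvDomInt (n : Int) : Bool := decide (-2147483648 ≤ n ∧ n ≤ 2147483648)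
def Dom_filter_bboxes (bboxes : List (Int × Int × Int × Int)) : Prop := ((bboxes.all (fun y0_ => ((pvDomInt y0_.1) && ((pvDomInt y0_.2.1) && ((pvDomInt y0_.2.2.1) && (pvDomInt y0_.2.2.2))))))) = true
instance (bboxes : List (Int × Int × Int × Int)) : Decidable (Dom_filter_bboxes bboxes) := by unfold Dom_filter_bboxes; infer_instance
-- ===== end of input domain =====

-- B swaps A's sort-all-then-filter for a running-max scan, a filter in input order, and a stable sort of only the kept subset.

-- ===== PORT A =====
def calculate_bbox_area (bbox : Int × Int × Int × Int) : Int :=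
  let width := |bbox.2.2.1 - bbox.1|
  let height := |bbox.2.2.2 - bbox.2.1|
  width * height

def filter_bboxes (bboxes : List (Int × Int × Int × Int)) : List (Int × Int × Int × Int) :=
  let areas := bboxes.map (fun bbox => (calculate_bbox_area bbox, bbox))
  let areas := PySem.List.sorted areas (fun x => x.1) true
  match PySem.List.pyGet? areas 0 with
  | none => []   -- areas[0][0] raises IndexError on the empty list; excluded by Pre_
  | some fst =>
    let max_area := fst.1
    areas.foldl (fun acc p => if max_area - p.1 ≤ 10000 then acc ++ [p.2] else acc) []

-- ===== PORT B =====
def filter_bboxes_alt (bboxes : List (Int × Int × Int × Int)) : List (Int × Int × Int × Int) :=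
  let scored := bboxes.map (fun b => (calculate_bbox_area b, b))
  match scored with
  | [] => []   -- scored[0][0] raises IndexError on the empty list; excluded by Pre_
  | p0 :: _ =>
    let max_area := scored.foldl (fun m q => if q.1 > m then q.1 else m) p0.1
    let kept := scored.filter (fun q => decide (max_area - q.1 ≤ 10000))
    (PySem.List.sorted kept (fun t => t.1) true).map (fun t => t.2)

-- ===== PRECONDITION & SPEC =====
-- Pre_: A raises IndexError on the empty list (areas[0][0]); that is the only exclusion.
def Pre_filter_bboxes (bboxes : List (Int × Int × Int × Int)) : Prop := bboxes ≠ []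
instance (bboxes : List (Int × Int × Int × Int)) : Decidable (Pre_filter_bboxes bboxes) := by unfold Pre_filter_bboxes; infer_instance
def pvWitness_filter_bboxes : (List (Int × Int × Int × Int)) := [(0, 0, 1, 1)]

def Spec_filter_bboxes (bboxes : List (Int × Int × Int × Int)) (out : List (Int × Int × Int × Int)) : Prop := out = filter_bboxes_alt bboxes
instance (bboxes : List (Int × Int × Int × Int)) (out : List (Int × Int × Int × Int)) : Decidable (Spec_filter_bboxes bboxes out) := by unfold Spec_filter_bboxes; infer_instance

-- ===== CLAIM (what is proved, stated in full; the proofs are below) =====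
def Claim_equal_filter_bboxes : Prop := ∀ (bboxes : List (Int × Int × Int × Int)), Dom_filter_bboxes bboxes → Pre_filter_bboxes bboxes → Spec_filter_bboxes bboxes (filter_bboxes bboxes)

-- ===== LEMMAS AND PROOFS =====

-- abbreviation used only in the proofs: one insertion step of the descending-by-area stable sort
def insD (x : Int × (Int × Int × Int × Int)) (ys : List (Int × (Int × Int × Int × Int))) :
    List (Int × (Int × Int × Int × Int)) :=
  PySem.List.insertBy (fun a b => decide (b.1 < a.1)) x ys

-- running-max bounds
theorem foldl_max_ge_seed (l : List (Int × (Int × Int × Int × Int))) (a : Int) :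
    a ≤ l.foldl (fun m q => if q.1 > m then q.1 else m) a := by
  induction l generalizing a with
  | nil => simp
  | cons x t ih =>
    simp only [List.foldl_cons]
    split_ifs with h
    · exact le_trans (le_of_lt h) (ih x.1)
    · exact ih a

theorem foldl_max_ge_mem (l : List (Int × (Int × Int × Int × Int))) (a : Int) :
    ∀ q ∈ l, q.1 ≤ l.foldl (fun m q => if q.1 > m then q.1 else m) a := by
  induction l generalizing a with
  | nil => simp
  | cons x t ih =>
    intro q hq
    simp only [List.mem_cons] at hq
    simp only [List.foldl_cons]
    rcases hq with rfl | hq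
    · split_ifs with h
      · exact foldl_max_ge_seed t q.1
      · exact le_trans (not_lt.mp h) (foldl_max_ge_seed t a)
    · split_ifs <;> exact ih _ q hq

theorem foldl_max_eq_seed_or_mem (l : List (Int × (Int × Int × Int × Int))) (a : Int) :
    l.foldl (fun m q => if q.1 > m then q.1 else m) a = a ∨
      ∃ q ∈ l, l.foldl (fun m q => if q.1 > m then q.1 else m) a = q.1 := by
  induction l generalizing a with
  | nil => simp
  | cons x t ih =>
    simp only [List.foldl_cons]
    split_ifs with h
    · rcases ih x.1 with h1 | ⟨q, hq, h1⟩
      · exact Or.inr ⟨x, by simp, h1⟩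
      · exact Or.inr ⟨q, by simp [hq], h1⟩
    · rcases ih a with h1 | ⟨q, hq, h1⟩
      · exact Or.inl h1
      · exact Or.inr ⟨q, by simp [hq], h1⟩

theorem insD_front (x : Int × (Int × Int × Int × Int)) (l : List (Int × (Int × Int × Int × Int)))
    (h : ∀ z ∈ l, z.1 < x.1) : insD x l = x :: l := by
  cases l with
  | nil => rfl
  | cons z t => simp [insD, PySem.List.insertBy, h z (by simp)]

theorem mem_insD {y x : Int × (Int × Int × Int × Int)} {ys : List (Int × (Int × Int × Int × Int))}
    (h : y ∈ insD x ys) : y = x ∨ y ∈ ys := by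
  induction ys with
  | nil => simp [insD, PySem.List.insertBy] at h; simp [h]
  | cons z t ih =>
    simp only [insD, PySem.List.insertBy] at h
    split_ifs at h with hz
    · rcases List.mem_cons.mp h with rfl | h
      · exact Or.inl rfl
      · exact Or.inr h
    · rcases List.mem_cons.mp h with rfl | h
      · simp
      · rcases ih h with rfl | h
        · exact Or.inl rfl
        · simp [h]

-- insertion keeps the accumulator weakly descending by area
theorem pairwise_insD (x : Int × (Int × Int × Int × Int)) (ys : List (Int × (Int × Int × Int × Int)))
    (h : ys.Pairwise (fun a b => b.1 ≤ a.1)) :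
    (insD x ys).Pairwise (fun a b => b.1 ≤ a.1) := by
  induction ys with
  | nil => simp [insD, PySem.List.insertBy]
  | cons y t ih =>
    rcases List.pairwise_cons.mp h with ⟨hy, ht⟩
    by_cases hby : y.1 < x.1
    · have : insD x (y :: t) = x :: y :: t := by
        simp [insD, PySem.List.insertBy, hby]
      rw [this]
      refine List.pairwise_cons.mpr ⟨?_, h⟩
      intro z hz
      rcases List.mem_cons.mp hz with rfl | hz
      · exact le_of_lt hby
      · exact le_trans (hy z hz) (le_of_lt hby)
    · have : insD x (y :: t) = y :: insD x t := by
        simp [insD, PySem.List.insertBy, hby]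
      rw [this]
      refine List.pairwise_cons.mpr ⟨?_, ih ht⟩
      intro z hz
      rcases mem_insD hz with rfl | hz
      · exact not_lt.mp hby
      · exact hy z hz

-- filter commutes with one insertion into a descending accumulator,
-- provided every rejected element has strictly smaller area than the inserted kept one
theorem filter_insD (p : Int × (Int × Int × Int × Int) → Bool) (x : Int × (Int × Int × Int × Int))
    (ys : List (Int × (Int × Int × Int × Int)))
    (hys : ys.Pairwise (fun a b => b.1 ≤ a.1))
    (hbef : p x = true → ∀ y, p y = false → y.1 < x.1) :
    (insD x ys).filter p = if p x then insD x (ys.filter p) else ys.filter p := by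
  induction ys with
  | nil => cases hpx : p x <;> simp [insD, PySem.List.insertBy, hpx]
  | cons y t ih =>
    rcases List.pairwise_cons.mp hys with ⟨hy, ht⟩
    by_cases hby : y.1 < x.1
    · have hstep : insD x (y :: t) = x :: y :: t := by
        simp [insD, PySem.List.insertBy, hby]
      cases hpx : p x
      · cases hpy : p y <;> simp [hstep, hpx, hpy]
      · cases hpy : p y
        · have hfront : insD x (t.filter p) = x :: t.filter p := by
            refine insD_front x _ (fun z hz => ?_)
            exact lt_of_le_of_lt (hy z (List.mem_of_mem_filter hz)) hby
          simp [hstep, hpx, hpy, hfront]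
        · have hfront : insD x (y :: t.filter p) = x :: y :: t.filter p := by
            refine insD_front x _ (fun z hz => ?_)
            rcases List.mem_cons.mp hz with rfl | hz
            · exact hby
            · exact lt_of_le_of_lt (hy z (List.mem_of_mem_filter hz)) hby
          simp [hstep, hpx, hpy, hfront]
    · have hstep : insD x (y :: t) = y :: insD x t := by
        simp [insD, PySem.List.insertBy, hby]
      cases hpx : p x
      · have ihs := ih ht
        simp only [hpx, if_neg Bool.false_ne_true] at ihs
        cases hpy : p y <;> simp [hstep, hpy, ihs]
      · have hpy : p y = true := by
          by_contra h
          exact hby (hbef hpx y (Bool.eq_false_iff.mpr h))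
        have ihs := ih ht
        simp only [hpx, if_true] at ihs
        have hstep2 : insD x (y :: t.filter p) = y :: insD x (t.filter p) := by
          simp [insD, PySem.List.insertBy, hby]
        simp [hstep, hpy, ihs, hstep2]

-- filter commutes with the whole insertion-sort fold
theorem filter_foldl_insD (p : Int × (Int × Int × Int × Int) → Bool)
    (xs acc : List (Int × (Int × Int × Int × Int)))
    (hacc : acc.Pairwise (fun a b => b.1 ≤ a.1))
    (hbef : ∀ x y, p x = true → p y = false → y.1 < x.1) :
    (xs.foldl (fun acc x => insD x acc) acc).filter p =
      (xs.filter p).foldl (fun acc x => insD x acc) (acc.filter p) := by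
  induction xs generalizing acc with
  | nil => simp
  | cons x t ih =>
    simp only [List.foldl_cons]
    rw [ih (insD x acc) (pairwise_insD x acc hacc)]
    rw [filter_insD p x acc hacc (fun hx y hy => hbef x y hx hy)]
    cases hpx : p x
    · simp [hpx]
    · simp [hpx]

-- sorted of the filtered list = filter of the sorted list
theorem sorted_filter_comm (p : Int × (Int × Int × Int × Int) → Bool)
    (xs : List (Int × (Int × Int × Int × Int)))
    (hbef : ∀ x y, p x = true → p y = false → y.1 < x.1) :
    PySem.List.sorted (xs.filter p) (fun t => t.1) true =
      (PySem.List.sorted xs (fun t => t.1) true).filter p := by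
  rw [PySem.List.sorted_rev_eq_foldl_insertBy, PySem.List.sorted_rev_eq_foldl_insertBy]
  rw [show (fun (acc : List (Int × (Int × Int × Int × Int))) x => PySem.List.insertBy
        (fun a b => decide ((fun t => t.1) b < (fun t => t.1) a)) x acc)
      = (fun acc x => insD x acc) from rfl]
  rw [filter_foldl_insD p xs [] (by simp) hbef]
  simp

-- ===== VERDICT (by name: the statement is the Claim_ definition above) =====
theorem filter_bboxes_spec : Claim_equal_filter_bboxes := by
  intro bboxes _ hpre
  unfold Spec_filter_bboxes filter_bboxes filter_bboxes_alt
  have hsne : bboxes.map (fun b => (calculate_bbox_area b, b)) ≠ [] := by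
    simpa using hpre
  obtain ⟨p0, t0, hcons⟩ := List.exists_cons_of_ne_nil hsne
  simp only [hcons]
  have hsortne : PySem.List.sorted (p0 :: t0) (fun x => x.1) true ≠ [] := by
    rw [Ne, PySem.List.sorted_eq_nil_iff]; simp
  obtain ⟨m, st, hsort⟩ := List.exists_cons_of_ne_nil hsortne
  have hmem_m : m ∈ p0 :: t0 := by
    have := (PySem.List.sorted_perm (p0 :: t0) (fun x => x.1) true).mem_iff (a := m)
    rw [hsort] at this; exact this.mp (by simp)
  have hub : ∀ y ∈ p0 :: t0, y.1 ≤ m.1 :=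
    PySem.List.key_head_sorted_rev_ge (p0 :: t0) (fun x => x.1) hsort
  have hmax_eq : m.1 = (p0 :: t0).foldl (fun m q => if q.1 > m then q.1 else m) p0.1 := by
    have h1 := foldl_max_ge_mem (p0 :: t0) p0.1 m hmem_m
    have h2 : (p0 :: t0).foldl (fun m q => if q.1 > m then q.1 else m) p0.1 ≤ m.1 := by
      rcases foldl_max_eq_seed_or_mem (p0 :: t0) p0.1 with h | ⟨q, hq, h⟩
      · rw [h]; exact hub p0 (by simp)
      · rw [h]; exact hub q hq
    omega
  rw [hsort]
  have hget : PySem.List.pyGet? (m :: st) (0 : Int) = some m := by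
    simp [PySem.List.pyGet?, PySem.List.pyIdx?]
  simp only [hget]
  have hfun : (fun (acc : List (Int × Int × Int × Int)) (p : Int × (Int × Int × Int × Int)) =>
      if m.1 - p.1 ≤ 10000 then acc ++ [p.2] else acc)
      = (fun acc p => if decide (m.1 - p.1 ≤ 10000) = true
          then acc ++ [p.2] else acc) := by
    funext acc p; simp
  rw [hfun]
  rw [show List.foldl (fun acc p => if decide (m.1 - p.1 ≤ 10000) = true then acc ++ [p.2] else acc)
        ([] : List (Int × Int × Int × Int)) (m :: st)
      = [] ++ List.map (fun p => p.2) (List.filter (fun q => decide (m.1 - q.1 ≤ 10000)) (m :: st))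
    from PySem.List.foldl_append_if (fun q => decide (m.1 - q.1 ≤ 10000)) (fun p => p.2) (m :: st) []]
  rw [← hmax_eq]
  rw [sorted_filter_comm (fun q => decide (m.1 - q.1 ≤ 10000)) (p0 :: t0)
    (fun x y hx hy => by simp at hx hy; omega)]
  rw [hsort]
  simp
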